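-- pv_equiv track=rewrite | github.com/ayushmantrivedi/recruiter-AI-agent | recruiter-ai-backend/app/agents/signal_judge.py | _normalize_company_name
-- ===== SOURCE A (Python) =====
-- def _normalize_company_name(company_name: str) -> str:
--     """Normalize company names for consistent grouping."""
--     try:
--         # Basic normalization
--         normalized = company_name.strip()
--
--         # Remove common suffixes
--         suffixes_to_remove = [
--             " inc", " Inc", " INC",
--             " llc", " LLC",
--             " ltd", " Ltd", " LTD",
--             " corp", " Corp", " CORP",
--             " co", " Co", " CO",
--             " gmbh", " GmbH",
--             " pty", " Pty"
--         ]
--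
--         for suffix in suffixes_to_remove:
--             if normalized.lower().endswith(suffix.lower()):
--                 normalized = normalized[:-len(suffix)].strip()
--                 break
--
--         return normalized
--
--     except Exception as e:
--         return company_name
-- ===== SOURCE B (Python) =====
-- _SUFFIX_WORDS = ("inc", "llc", "ltd", "corp", "co", "gmbh", "pty")
--
--
-- def _normalize_company_name(company_name: str) -> str:
--     """Normalize company names for consistent grouping."""
--     try:
--         s = company_name.strip()
--         # scan back to front for the last space; k ends up just past it (or 0)
--         k = len(s)
--         while k and s[k - 1] != " ":
--             k -= 1
--         if k and s[k:].lower() in _SUFFIX_WORDS: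
--             return s[: k - 1].strip()
--         return s
--     except Exception:
--         return company_name
-- ===== Notes on version B (the rewrite author's own statement) =====
-- stated objective: alternative
-- what changed: Replaces A's 18-iteration loop of lowercased endswith tests (each lowercasing the whole string) by a single back-to-front scan to the last space followed by one membership test of the lowercased last word in 7 words.
import Mathlib
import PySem

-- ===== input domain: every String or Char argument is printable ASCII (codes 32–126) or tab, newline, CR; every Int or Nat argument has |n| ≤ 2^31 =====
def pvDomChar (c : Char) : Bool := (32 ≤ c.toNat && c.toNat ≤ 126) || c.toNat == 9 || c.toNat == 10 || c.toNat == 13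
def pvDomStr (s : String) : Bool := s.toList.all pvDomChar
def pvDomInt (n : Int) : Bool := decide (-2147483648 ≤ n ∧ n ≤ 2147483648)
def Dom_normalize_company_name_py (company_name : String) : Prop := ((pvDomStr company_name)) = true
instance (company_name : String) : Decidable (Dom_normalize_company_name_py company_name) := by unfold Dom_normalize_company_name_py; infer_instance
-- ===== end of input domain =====

-- B replaces A's 18-iteration lowercased-endswith loop by one back-to-front scan to the last
-- space plus one membership test of the lowercased last word in 7 words (objective: alternative).
-- (On the String type both programs are total; the Python try/except only fires for non-str input.)

-- ===== PORT A =====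
def pvSuffixes : List String :=
  [" inc", " Inc", " INC",
   " llc", " LLC",
   " ltd", " Ltd", " LTD",
   " corp", " Corp", " CORP",
   " co", " Co", " CO",
   " gmbh", " GmbH",
   " pty", " Pty"]

-- the for-loop with break: first matching suffix is removed, then strip
def pvLoopA : List String → String → String
  | [], normalized => normalized
  | suffix :: rest, normalized =>
    if PySem.Str.endswith (PySem.Str.lower normalized) (PySem.Str.lower suffix) then
      PySem.Str.strip (PySem.Str.slice normalized none (some (-(PySem.Str.len suffix : Int))))
    else pvLoopA rest normalized

def normalize_company_name_py (company_name : String) : String :=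
  pvLoopA pvSuffixes (PySem.Str.strip company_name)

-- ===== PORT B =====
def pvWords : List (List Char) :=
  ["inc".toList, "llc".toList, "ltd".toList, "corp".toList, "co".toList, "gmbh".toList, "pty".toList]

-- `while k and s[k-1] != " ": k -= 1` (structural recursion on k; the index k-1 is always in
-- range since the loop starts at k = len(s), so List.getD is exact for s[k-1])
def pvScan (cs : List Char) : Nat → Nat
  | 0 => 0
  | Nat.succ k => if cs.getD k ' ' == ' ' then k + 1 else pvScan cs k

-- s[k:] and s[:k-1] with 0 ≤ k ≤ len(s) are exactly List.drop/List.take; the tuple-membership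
-- test compares the lowercased last word (as code points) with the 7 words
def normalize_company_name_py_alt (company_name : String) : String :=
  let s := PySem.Str.strip company_name
  let cs := s.toList
  let k := pvScan cs cs.length
  if k ≠ 0 ∧ PySem.Chars.lower (cs.drop k) ∈ pvWords then
    String.ofList (PySem.Chars.strip (cs.take (k - 1)))
  else s

-- ===== PRECONDITION & SPEC =====
def Spec_normalize_company_name_py (company_name : String) (out : String) : Prop := out = normalize_company_name_py_alt company_name
instance (company_name : String) (out : String) : Decidable (Spec_normalize_company_name_py company_name out) := by unfold Spec_normalize_company_name_py; infer_instance

-- ===== CLAIM (what is proved, stated in full; the proofs are below) =====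
def Claim_equal_normalize_company_name_py : Prop := ∀ (company_name : String), Dom_normalize_company_name_py company_name → Spec_normalize_company_name_py company_name (normalize_company_name_py company_name)

-- ===== LEMMAS AND PROOFS =====

theorem pvScan_succ (cs : List Char) (k : Nat) :
    pvScan cs (k + 1) = if cs.getD k ' ' == ' ' then k + 1 else pvScan cs k := rfl

-- lowercasing never produces a space
theorem pvLowerChar_eq_space_iff (c : Char) : PySem.Chars.lowerChar c = ' ' ↔ c = ' ' := by
  unfold PySem.Chars.lowerChar
  split_ifs with h
  · simp [PySem.Chars.isupper] at h
    have h65 : 65 ≤ c.toNat := Nat.succ_le_of_lt h.1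
    have h90 : c.toNat ≤ 90 := h.2
    constructor
    · intro he
      have hv : Nat.isValidChar (c.toNat + 32) := by left; omega
      have ht : (Char.ofNat (c.toNat + 32)).toNat = c.toNat + 32 := by
        rw [Char.ofNat, dif_pos hv]; rfl
      rw [he] at ht
      simp at ht; omega
    · intro he; subst he; simp at h65
  · rfl

theorem pvMem_space_lower (t : List Char) : (' ' ∈ PySem.Chars.lower t) ↔ ' ' ∈ t := by
  unfold PySem.Chars.lower
  simp only [List.mem_map]
  constructor
  · rintro ⟨c, hc, he⟩; rwa [(pvLowerChar_eq_space_iff c).mp he] at hc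
  · intro hc; exact ⟨' ', hc, (pvLowerChar_eq_space_iff ' ').mpr rfl⟩

-- decomposition of a list by its LAST space
theorem pvSpace_decomp (l : List Char) :
    ((' ' : Char) ∉ l) ∨ ∃ h t, l = h ++ ' ' :: t ∧ (' ' : Char) ∉ t := by
  induction l with
  | nil => left; simp
  | cons c l ih =>
    rcases ih with hn | ⟨h, t, rfl, ht⟩
    · by_cases hc : c = ' '
      · right; exact ⟨[], l, by simp [hc], hn⟩
      · left
        simp only [List.mem_cons, not_or]
        exact ⟨fun he => hc he.symm, hn⟩
    · right; exact ⟨c :: h, t, rfl, ht⟩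

-- pvScan only looks below its fuel
theorem pvScan_append (xs ext : List Char) (k : Nat) (hk : k ≤ xs.length) :
    pvScan (xs ++ ext) k = pvScan xs k := by
  induction k with
  | zero => rfl
  | succ k ih =>
    unfold pvScan
    rw [List.getD_append xs ext ' ' k (by omega), ih (by omega)]

theorem pvScan_nospace (cs : List Char) (hn : (' ' : Char) ∉ cs) :
    ∀ k, k ≤ cs.length → pvScan cs k = 0 := by
  intro k
  induction k with
  | zero => intro _; rfl
  | succ k ih =>
    intro hk
    rw [pvScan_succ]
    have hmem : cs.getD k ' ' ∈ cs := by
      rw [List.getD_eq_getElem cs ' ' (by omega)]; exact List.getElem_mem _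
    have hne : cs.getD k ' ' ≠ ' ' := fun he => hn (he ▸ hmem)
    rw [if_neg (by simpa using hne), ih (by omega)]

theorem pvScan_found (h t : List Char) (ht : (' ' : Char) ∉ t) :
    pvScan (h ++ ' ' :: t) (h.length + 1 + t.length) = h.length + 1 := by
  induction t using List.reverseRecOn with
  | nil =>
    rw [show h.length + 1 + ([] : List Char).length = h.length + 1 from by simp, pvScan_succ]
    rw [show (h ++ [' ']).getD h.length ' ' = ' ' from by
      rw [List.getD_eq_getElem _ ' ' (show h.length < (h ++ [' ']).length from by simp)]
      simp]
    simp
  | append_singleton t c ih =>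
    have hc : c ≠ ' ' := fun he => ht (by simp [he])
    have ht' : (' ' : Char) ∉ t := fun hx => ht (by simp [hx])
    have hidx : (h ++ ' ' :: (t ++ [c])).getD (h.length + 1 + t.length) ' ' = c := by
      have he : h ++ ' ' :: (t ++ [c]) = (h ++ ' ' :: t) ++ [c] := by simp
      rw [he, List.getD_eq_getElem _ ' '
        (show h.length + 1 + t.length < (h ++ ' ' :: t ++ [c]).length from by simp; omega)]
      rw [List.getElem_append_right (show (h ++ ' ' :: t).length ≤ h.length + 1 + t.length from by simp; omega)]
      simp
    rw [show h.length + 1 + (t ++ [c]).length = (h.length + 1 + t.length) + 1 from by simp; omega,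
      pvScan_succ, hidx, if_neg (by simpa using hc)]
    rw [show h ++ ' ' :: (t ++ [c]) = (h ++ ' ' :: t) ++ [c] from by simp]
    rw [pvScan_append _ _ _ (show h.length + 1 + t.length ≤ (h ++ ' ' :: t).length from by simp; omega)]
    exact ih ht'

-- A's loop condition, evaluated through the decomposition by the last space
theorem pvCond_found (h t w : List Char) (ht : (' ' : Char) ∉ t) (hw : (' ' : Char) ∉ w) :
    (PySem.Chars.endswith (PySem.Chars.lower (h ++ ' ' :: t)) (' ' :: w) = true) ↔
      PySem.Chars.lower t = w := by
  rw [PySem.Chars.endswith_iff]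
  have hl : PySem.Chars.lower (h ++ ' ' :: t)
      = PySem.Chars.lower h ++ ' ' :: PySem.Chars.lower t := by
    simp [PySem.Chars.lower, PySem.Chars.lowerChar, PySem.Chars.isupper]
  rw [hl]
  constructor
  · intro hsuf
    have h2 : (' ' :: PySem.Chars.lower t) <:+ PySem.Chars.lower h ++ ' ' :: PySem.Chars.lower t :=
      ⟨PySem.Chars.lower h, rfl⟩
    rcases List.suffix_or_suffix_of_suffix hsuf h2 with hs | hs
    · rcases List.suffix_cons_iff.mp hs with he | hs'
      · simp only [List.cons.injEq] at he; exact he.2.symm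
      · exfalso
        have hmem : ' ' ∈ PySem.Chars.lower t :=
          List.IsSuffix.mem (show (' ' : Char) ∈ ' ' :: w from by simp) hs'
        exact ht ((pvMem_space_lower t).mp hmem)
    · rcases List.suffix_cons_iff.mp hs with he | hs'
      · simp only [List.cons.injEq] at he; exact he.2
      · exfalso
        have hmem : ' ' ∈ w :=
          List.IsSuffix.mem (show (' ' : Char) ∈ ' ' :: PySem.Chars.lower t from by simp) hs'
        exact hw hmem
  · rintro rfl
    exact ⟨PySem.Chars.lower h, rfl⟩

theorem pvCond_nospace (l p : List Char) (hn : (' ' : Char) ∉ l) (hp : ' ' ∈ p) :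
    PySem.Chars.endswith (PySem.Chars.lower l) p = false := by
  cases hb : PySem.Chars.endswith (PySem.Chars.lower l) p with
  | false => rfl
  | true =>
    exfalso
    have hsuf := (PySem.Chars.endswith_iff _ _).mp hb
    exact hn ((pvMem_space_lower l).mp (List.IsSuffix.mem hp hsuf))

-- the same two facts lifted to the Str-level conditions A's loop actually tests
theorem pvCondStr_found (h t : List Char) (suf : String) (w : List Char)
    (ht : (' ' : Char) ∉ t) (hw : (' ' : Char) ∉ w)
    (hlow : PySem.Chars.lower suf.toList = ' ' :: w) :
    PySem.Str.endswith (PySem.Str.lower (String.ofList (h ++ ' ' :: t))) (PySem.Str.lower suf)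
      = decide (PySem.Chars.lower t = w) := by
  have : PySem.Str.endswith (PySem.Str.lower (String.ofList (h ++ ' ' :: t))) (PySem.Str.lower suf)
      = PySem.Chars.endswith (PySem.Chars.lower (h ++ ' ' :: t)) (' ' :: w) := by
    simp [PySem.Str.endswith, PySem.Str.lower, hlow]
  rw [this]
  by_cases he : PySem.Chars.lower t = w
  · simp [he, (pvCond_found h t w ht hw).mpr he]
  · have hf : PySem.Chars.endswith (PySem.Chars.lower (h ++ ' ' :: t)) (' ' :: w) = false := by
      cases hb : PySem.Chars.endswith (PySem.Chars.lower (h ++ ' ' :: t)) (' ' :: w) with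
      | false => rfl
      | true => exact absurd ((pvCond_found h t w ht hw).mp hb) he
    simp [hf, he]

theorem pvCondStr_nospace (l : List Char) (suf : String)
    (hn : (' ' : Char) ∉ l) (hp : ' ' ∈ PySem.Chars.lower suf.toList) :
    PySem.Str.endswith (PySem.Str.lower (String.ofList l)) (PySem.Str.lower suf) = false := by
  simp [PySem.Str.endswith, PySem.Str.lower]
  exact pvCond_nospace l _ hn (by simpa using hp)

-- loop-shape facts for pvLoopA
theorem pvLoopA_all_false (L : List String) (n : String)
    (hf : ∀ s ∈ L, PySem.Str.endswith (PySem.Str.lower n) (PySem.Str.lower s) = false) :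
    pvLoopA L n = n := by
  induction L with
  | nil => rfl
  | cons s L ih =>
    unfold pvLoopA
    rw [hf s (by simp), ih (fun x hx => hf x (by simp [hx]))]
    simp

theorem pvLoopA_found (L1 : List String) (suf : String) (L2 : List String) (n : String)
    (hf : ∀ s ∈ L1, PySem.Str.endswith (PySem.Str.lower n) (PySem.Str.lower s) = false)
    (ht : PySem.Str.endswith (PySem.Str.lower n) (PySem.Str.lower suf) = true) :
    pvLoopA (L1 ++ suf :: L2) n
      = PySem.Str.strip (PySem.Str.slice n none (some (-(PySem.Str.len suf : Int)))) := by
  induction L1 with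
  | nil =>
    rw [List.nil_append]
    show pvLoopA (suf :: L2) n = _
    unfold pvLoopA
    rw [ht]
    simp
  | cons s L1 ih =>
    show pvLoopA (s :: (L1 ++ suf :: L2)) n = _
    unfold pvLoopA
    rw [hf s (by simp), ih (fun x hx => hf x (by simp [hx]))]
    simp

-- Python s[:-k] for 0 < k ≤ len(s)
theorem pvClamp_neg (n k : Nat) (h0 : 0 < k) (h : k ≤ n) :
    PySem.List.clampIdx n (-(k : Int)) = n - k := by
  simp [PySem.List.clampIdx]; split_ifs <;> omega

theorem pvSlice_neg (xs : List Char) (k : Nat) (h0 : 0 < k) (h : k ≤ xs.length) :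
    PySem.List.slice xs none (some (-(k : Int))) = xs.take (xs.length - k) := by
  simp [PySem.List.slice, pvClamp_neg xs.length k h0 h]

theorem pvLower_length (t : List Char) : (PySem.Chars.lower t).length = t.length := by
  simp [PySem.Chars.lower]

-- the heart: on any character list, A's loop equals B's last-word test
theorem pvCondStr2 (h t : List Char) (ht : (' ' : Char) ∉ t) (suf : String)
    (hlow : PySem.Chars.lower suf.toList = ' ' :: (PySem.Chars.lower suf.toList).tail)
    (hwns : (' ' : Char) ∉ (PySem.Chars.lower suf.toList).tail) :
    PySem.Str.endswith (PySem.Str.lower (String.ofList (h ++ ' ' :: t))) (PySem.Str.lower suf)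
      = decide (PySem.Chars.lower t = (PySem.Chars.lower suf.toList).tail) :=
  pvCondStr_found h t suf _ ht hwns hlow

theorem pvCase (h t : List Char) (ht : (' ' : Char) ∉ t)
    (L1 L2 : List String) (suf : String) (w : List Char)
    (hsplit : pvSuffixes = L1 ++ suf :: L2)
    (hw : PySem.Chars.lower t = w)
    (hwns : (' ' : Char) ∉ w)
    (hlow : PySem.Chars.lower suf.toList = ' ' :: w)
    (hlen : PySem.Str.len suf = w.length + 1)
    (hfalse : ∀ s ∈ L1, PySem.Str.endswith (PySem.Str.lower (String.ofList (h ++ ' ' :: t))) (PySem.Str.lower s) = false) :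
    pvLoopA pvSuffixes (String.ofList (h ++ ' ' :: t)) = String.ofList (PySem.Chars.strip h) := by
  have htrue : PySem.Str.endswith (PySem.Str.lower (String.ofList (h ++ ' ' :: t))) (PySem.Str.lower suf) = true := by
    rw [pvCondStr_found h t suf w ht hwns hlow, hw]; simp
  rw [hsplit, pvLoopA_found L1 suf L2 _ hfalse htrue]
  have htl : t.length = w.length := by
    have := pvLower_length t; rw [hw] at this; omega
  have hslice : PySem.Str.slice (String.ofList (h ++ ' ' :: t)) none (some (-(PySem.Str.len suf : Int)))
      = String.ofList h := by
    rw [hlen, PySem.Str.slice]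
    simp only [String.toList_ofList, PySem.Chars.slice_eq_listSlice]
    rw [show (-((w.length : Int) + 1)) = -(((w.length + 1 : Nat) : Int)) from by push_cast; ring]
    rw [pvSlice_neg _ (w.length + 1) (by omega) (by simp; omega)]
    rw [show (h ++ ' ' :: t).length - (w.length + 1) = h.length from by simp; omega]
    congr 1
    exact List.take_left
  rw [hslice]
  simp only [PySem.Str.strip, String.toList_ofList]

set_option maxRecDepth 4096 in
theorem pvMain (l : List Char) :
    pvLoopA pvSuffixes (String.ofList l) =
      (if pvScan l l.length ≠ 0 ∧ PySem.Chars.lower (l.drop (pvScan l l.length)) ∈ pvWords then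
        String.ofList (PySem.Chars.strip (l.take (pvScan l l.length - 1)))
      else String.ofList l) := by
  rcases pvSpace_decomp l with hn | ⟨h, t, rfl, ht⟩
  · have hk : pvScan l l.length = 0 := pvScan_nospace l hn l.length le_rfl
    rw [hk]
    rw [if_neg (by intro hcon; exact hcon.1 rfl)]
    apply pvLoopA_all_false
    intro s hs
    simp only [pvSuffixes, List.mem_cons, List.not_mem_nil, or_false] at hs
    rcases hs with rfl | rfl | rfl | rfl | rfl | rfl | rfl | rfl | rfl | rfl | rfl | rfl | rfl | rfl | rfl | rfl | rfl | rfl <;>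
      exact pvCondStr_nospace l _ hn (by decide)
  · have hlen : (h ++ ' ' :: t).length = h.length + 1 + t.length := by simp; omega
    have hk : pvScan (h ++ ' ' :: t) (h ++ ' ' :: t).length = h.length + 1 := by
      rw [hlen]; exact pvScan_found h t ht
    rw [hk]
    have hdrop : (h ++ ' ' :: t).drop (h.length + 1) = t := by
      rw [show h ++ ' ' :: t = (h ++ [' ']) ++ t from by simp,
        show h.length + 1 = (h ++ [' ']).length from by simp]
      exact List.drop_left
    have htake : (h ++ ' ' :: t).take (h.length + 1 - 1) = h := by
      simp only [Nat.add_sub_cancel]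
      exact List.take_left
    rw [hdrop, htake]
    by_cases hm : PySem.Chars.lower t ∈ pvWords
    · rw [if_pos ⟨by omega, hm⟩]
      simp only [pvWords, List.mem_cons, List.not_mem_nil, or_false] at hm
      rcases hm with hw | hw | hw | hw | hw | hw | hw
      · exact pvCase h t ht []
          [" Inc", " INC", " llc", " LLC", " ltd", " Ltd", " LTD", " corp", " Corp", " CORP", " co", " Co", " CO", " gmbh", " GmbH", " pty", " Pty"]
          " inc" "inc".toList rfl hw (by decide) (by decide) (by decide) (by simp)
      · refine pvCase h t ht [" inc", " Inc", " INC"]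
          [" LLC", " ltd", " Ltd", " LTD", " corp", " Corp", " CORP", " co", " Co", " CO", " gmbh", " GmbH", " pty", " Pty"]
          " llc" "llc".toList rfl hw (by decide) (by decide) (by decide) ?_
        intro s hs
        fin_cases hs <;> (rw [pvCondStr2 h t ht _ (by decide) (by decide), hw]; decide)
      · refine pvCase h t ht [" inc", " Inc", " INC", " llc", " LLC"]
          [" Ltd", " LTD", " corp", " Corp", " CORP", " co", " Co", " CO", " gmbh", " GmbH", " pty", " Pty"]
          " ltd" "ltd".toList rfl hw (by decide) (by decide) (by decide) ?_
        intro s hs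
        fin_cases hs <;> (rw [pvCondStr2 h t ht _ (by decide) (by decide), hw]; decide)
      · refine pvCase h t ht [" inc", " Inc", " INC", " llc", " LLC", " ltd", " Ltd", " LTD"]
          [" Corp", " CORP", " co", " Co", " CO", " gmbh", " GmbH", " pty", " Pty"]
          " corp" "corp".toList rfl hw (by decide) (by decide) (by decide) ?_
        intro s hs
        fin_cases hs <;> (rw [pvCondStr2 h t ht _ (by decide) (by decide), hw]; decide)
      · refine pvCase h t ht [" inc", " Inc", " INC", " llc", " LLC", " ltd", " Ltd", " LTD", " corp", " Corp", " CORP"]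
          [" Co", " CO", " gmbh", " GmbH", " pty", " Pty"]
          " co" "co".toList rfl hw (by decide) (by decide) (by decide) ?_
        intro s hs
        fin_cases hs <;> (rw [pvCondStr2 h t ht _ (by decide) (by decide), hw]; decide)
      · refine pvCase h t ht [" inc", " Inc", " INC", " llc", " LLC", " ltd", " Ltd", " LTD", " corp", " Corp", " CORP", " co", " Co", " CO"]
          [" GmbH", " pty", " Pty"]
          " gmbh" "gmbh".toList rfl hw (by decide) (by decide) (by decide) ?_
        intro s hs
        fin_cases hs <;> (rw [pvCondStr2 h t ht _ (by decide) (by decide), hw]; decide)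
      · refine pvCase h t ht [" inc", " Inc", " INC", " llc", " LLC", " ltd", " Ltd", " LTD", " corp", " Corp", " CORP", " co", " Co", " CO", " gmbh", " GmbH"]
          [" Pty"]
          " pty" "pty".toList rfl hw (by decide) (by decide) (by decide) ?_
        intro s hs
        fin_cases hs <;> (rw [pvCondStr2 h t ht _ (by decide) (by decide), hw]; decide)
    · rw [if_neg (by intro hcon; exact hm hcon.2)]
      apply pvLoopA_all_false
      intro s hs
      simp only [pvSuffixes, List.mem_cons, List.not_mem_nil, or_false] at hs
      rcases hs with rfl | rfl | rfl | rfl | rfl | rfl | rfl | rfl | rfl | rfl | rfl | rfl | rfl | rfl | rfl | rfl | rfl | rfl <;>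
        (rw [pvCondStr2 h t ht _ (by decide) (by decide)]
         simp only [decide_eq_false_iff_not]
         intro he
         exact hm (by rw [he]; decide))

-- ===== VERDICT (by name: the statement is the Claim_ definition above) =====
theorem normalize_company_name_py_spec : Claim_equal_normalize_company_name_py := by
  intro company_name _
  unfold Spec_normalize_company_name_py normalize_company_name_py normalize_company_name_py_alt
  have hs : PySem.Str.strip company_name
      = String.ofList (PySem.Chars.strip company_name.toList) := rfl
  rw [hs]
  simpa [String.toList_ofList] using pvMain (PySem.Chars.strip company_name.toList)
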